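-- pv_equiv track=rewrite | github.com/baodongli/exercise | hackerrank/dynamic-programming/decibinary/decibinary.py | decibinary
-- ===== SOURCE A (Python) =====
-- def decibinary(x):
--     db = x
--     div = 10
--
--     deci_value = 0
--     shift = 0
--     while db:
--         digit = db % div
--         db = db // div
--
--         deci_value += digit << shift
--         shift += 1
--
--     return deci_value
-- ===== SOURCE B (Python) =====
-- def decibinary(x):
--     deci_value = 0
--     for c in str(x):
--         deci_value = deci_value * 2 + int(c)
--     return deci_value
-- ===== Notes on version B (the rewrite author's own statement) =====
-- stated objective: idiomatic
-- what changed: B folds Horner's rule (acc*2 + digit) over the decimal string of x most-significant-digit-first, replacing A's least-significant-first modulo extraction with an explicit shift counter.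
import Mathlib
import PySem

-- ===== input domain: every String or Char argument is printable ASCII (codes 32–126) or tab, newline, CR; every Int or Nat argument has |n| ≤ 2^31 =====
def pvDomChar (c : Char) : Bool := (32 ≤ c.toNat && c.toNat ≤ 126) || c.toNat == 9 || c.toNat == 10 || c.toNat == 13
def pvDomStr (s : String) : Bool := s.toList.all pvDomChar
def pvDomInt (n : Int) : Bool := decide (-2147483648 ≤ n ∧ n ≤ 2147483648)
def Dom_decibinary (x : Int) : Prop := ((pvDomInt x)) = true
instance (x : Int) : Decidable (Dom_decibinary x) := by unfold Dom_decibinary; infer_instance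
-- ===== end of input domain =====

-- B replaces A's least-significant-first modulo/shift loop by Horner's rule folded over str(x); same cost ("idiomatic").
-- Pre_: 0 ≤ x — on negative x the Python A never terminates (db // 10 never reaches 0), so A returns only on x ≥ 0.

-- ===== PORT A =====
-- Python 'while db: digit = db % 10; db = db // 10; deci += digit << shift; shift += 1'.
-- Guard '0 < db' instead of 'db ≠ 0' makes the recursion total: for db < 0 the Python loop never
-- terminates (outside Pre_), so the port is exact wherever Python A returns.
def decibinaryLoop (db deci : Int) (shift : Nat) : Int :=
  if h : 0 < db then
    decibinaryLoop (PySem.Int.floordiv db 10) (deci + PySem.Int.mod db 10 <<< shift) (shift + 1)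
  else deci
termination_by db.toNat
decreasing_by
  rw [PySem.Int.floordiv_eq_ediv_of_pos (by norm_num)]
  omega

def decibinary (x : Int) : Int := decibinaryLoop x 0 0

-- ===== PORT B =====
-- 'deci_value = 0; for c in str(x): deci_value = deci_value * 2 + int(c)'.
-- int(c) is PySem.Int.ofChars? [c]; it is none exactly where Python raises ValueError,
-- which never happens under Pre_ (every character of str(x) for x ≥ 0 is a digit).
def decibinary_alt (x : Int) : Int :=
  (PySem.Int.toChars x).foldl (fun r c => r * 2 + (PySem.Int.ofChars? [c]).getD 0) 0

-- ===== PRECONDITION & SPEC =====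
-- Pre_ excludes only negative x, on which Python A loops forever (it never returns there).
def Pre_decibinary (x : Int) : Prop := 0 ≤ x
instance (x : Int) : Decidable (Pre_decibinary x) := by unfold Pre_decibinary; infer_instance
def pvWitness_decibinary : Int := 2023

def Spec_decibinary (x : Int) (out : Int) : Prop := out = decibinary_alt x
instance (x : Int) (out : Int) : Decidable (Spec_decibinary x out) := by unfold Spec_decibinary; infer_instance

-- ===== CLAIM (what is proved, stated in full; the proofs are below) =====
def Claim_equal_decibinary : Prop := ∀ (x : Int), Dom_decibinary x → Pre_decibinary x → Spec_decibinary x (decibinary x)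

-- ===== LEMMAS AND PROOFS =====

-- the common decibinary value of a nonnegative number, digit recursion (proof helper only)
def pvDbv (n : Nat) : Int :=
  if h : n = 0 then 0
  else ((n % 10 : Nat) : Int) + 2 * pvDbv (n / 10)
termination_by n
decreasing_by exact Nat.div_lt_self (Nat.pos_of_ne_zero h) (by norm_num)

theorem pvLoop_eq (n : Nat) : ∀ (deci : Int) (shift : Nat),
    decibinaryLoop (n : Int) deci shift = deci + pvDbv n * 2 ^ shift := by
  induction n using Nat.strong_induction_on with
  | _ n ih =>
    intro deci shift
    rw [decibinaryLoop]
    by_cases h0 : n = 0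
    · subst h0; simp [pvDbv]
    · have hpos : 0 < (n : Int) := by exact_mod_cast Nat.pos_of_ne_zero h0
      rw [dif_pos hpos]
      have hdiv : PySem.Int.floordiv (n : Int) 10 = ((n / 10 : Nat) : Int) := by
        exact_mod_cast PySem.Int.floordiv_natCast n 10
      have hmod : PySem.Int.mod (n : Int) 10 = ((n % 10 : Nat) : Int) := by
        exact_mod_cast PySem.Int.mod_natCast n 10
      rw [hdiv, hmod, ih (n / 10) (Nat.div_lt_self (Nat.pos_of_ne_zero h0) (by norm_num))]
      rw [show (pvDbv n) = ((n % 10 : Nat) : Int) + 2 * pvDbv (n / 10) by rw [pvDbv]; simp [h0]]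
      rw [Int.shiftLeft_eq]
      push_cast
      ring

theorem pvDigit_int (d : Nat) (hd : d < 10) :
    (PySem.Int.ofChars? [Nat.digitChar d]).getD 0 = (d : Int) := by
  interval_cases d <;> decide

theorem pvHorner_eq (n : Nat) : ∀ (a : Int),
    (Nat.toDigits 10 n).foldl (fun r c => r * 2 + (PySem.Int.ofChars? [c]).getD 0) a
      = a * 2 ^ (Nat.toDigits 10 n).length + pvDbv n := by
  induction n using Nat.strong_induction_on with
  | _ n ih =>
    intro a
    by_cases h : n < 10
    · rw [Nat.toDigits_of_lt_base h]
      simp only [List.foldl_cons, List.foldl_nil, List.length_cons, List.length_nil]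
      rw [pvDigit_int n h]
      rw [pvDbv]
      by_cases h0 : n = 0
      · subst h0; simp
      · rw [dif_neg h0, Nat.div_eq_of_lt h, Nat.mod_eq_of_lt h]
        rw [show pvDbv 0 = 0 by simp [pvDbv]]
        ring
    · rw [Nat.toDigits_of_base_le (by norm_num) (le_of_not_gt h)]
      rw [List.foldl_append, List.length_append]
      rw [ih (n / 10) (Nat.div_lt_self (by omega) (by norm_num))]
      simp only [List.foldl_cons, List.foldl_nil, List.length_cons, List.length_nil]
      rw [pvDigit_int (n % 10) (Nat.mod_lt n (by norm_num))]
      rw [show (pvDbv n) = ((n % 10 : Nat) : Int) + 2 * pvDbv (n / 10) by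
        rw [pvDbv]; simp [show n ≠ 0 by omega]]
      rw [pow_add]
      ring

-- ===== VERDICT (by name: the statement is the Claim_ definition above) =====
theorem decibinary_spec : Claim_equal_decibinary := by
  intro x _ hpre
  unfold Spec_decibinary decibinary decibinary_alt
  have hx : ((x.toNat : Nat) : Int) = x := Int.toNat_of_nonneg hpre
  have hchars : PySem.Int.toChars x = Nat.toDigits 10 x.toNat := by
    simp [PySem.Int.toChars, not_lt.mpr hpre]
  rw [hchars, pvHorner_eq]
  conv_lhs => rw [← hx]
  rw [pvLoop_eq]
  simp
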